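-- pv_equiv track=rewrite | github.com/CshlSiepelLab/bat_genome_analysis | psg/scripts/clean_msa.py | unique_indel
-- ===== SOURCE A (Python) =====
-- def unique_indel(indeldict,alignment,targets):
--     ''' Take in dictionary with nested list values and
--     return dictionary with consecutive numbers as keys.
--     The value is a nested list of previous keys (taxa) and a single
--     indel start stop position shared by the taxa.'''
--     uniquedict = {}
--     for target in targets:
--         uniqdels = []
--         uniqins = []
--         alldels =  []
--         allins = []
--         for taxon,value in indeldict.items():
--             if taxon != target:
--                 # If taxon has deletions
--                 for dels in value[0]:
--                     alldels.append(dels)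
--                 # If taxon has insertions
--                 if len(value)>1:
--                     for ins in value[1]:
--                         allins.append(ins)
--         try:
--             targetdels = indeldict[target][0]
--             targetins = indeldict[target][1]
--             for candel in targetdels:
--                 if candel not in alldels:
--                     uniqdels.append(candel)
--             for canins in targetins:
--                 if canins not in allins:
--                     uniqins.append(canins)
--         except:
--             pass
--         uniquedict[target] = [uniqdels,uniqins]
--     return uniquedict
-- ===== SOURCE B (Python) =====
-- from collections import Counter
--
--
-- def unique_indel(indeldict, alignment, targets):
--     # One global pass: count every deletion/insertion across all taxa,
--     # then an indel of a target is unique iff all global occurrences are the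
--     # target's own (global count == target's own count).
--     del_cnt = Counter()
--     ins_cnt = Counter()
--     for value in indeldict.values():
--         if len(value) > 0:
--             for d in value[0]:
--                 del_cnt[tuple(d)] += 1
--         if len(value) > 1:
--             for i in value[1]:
--                 ins_cnt[tuple(i)] += 1
--     uniquedict = {}
--     for target in targets:
--         value = indeldict.get(target)
--         if value is not None and len(value) >= 2:
--             dels, ins = value[0], value[1]
--             own_d = Counter(tuple(d) for d in dels)
--             own_i = Counter(tuple(i) for i in ins)
--             uniquedict[target] = [
--                 [d for d in dels if del_cnt[tuple(d)] == own_d[tuple(d)]],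
--                 [i for i in ins if ins_cnt[tuple(i)] == own_i[tuple(i)]],
--             ]
--         else:
--             uniquedict[target] = [[], []]
--     return uniquedict
-- ===== Notes on version B (the rewrite author's own statement) =====
-- stated objective: faster
-- what changed: A rescans all other taxa's indel lists for every target (membership test per candidate); B makes one global counting pass (Counter of every deletion/insertion) and decides uniqueness per target by comparing the global count with the target's own count.
import Mathlib
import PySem

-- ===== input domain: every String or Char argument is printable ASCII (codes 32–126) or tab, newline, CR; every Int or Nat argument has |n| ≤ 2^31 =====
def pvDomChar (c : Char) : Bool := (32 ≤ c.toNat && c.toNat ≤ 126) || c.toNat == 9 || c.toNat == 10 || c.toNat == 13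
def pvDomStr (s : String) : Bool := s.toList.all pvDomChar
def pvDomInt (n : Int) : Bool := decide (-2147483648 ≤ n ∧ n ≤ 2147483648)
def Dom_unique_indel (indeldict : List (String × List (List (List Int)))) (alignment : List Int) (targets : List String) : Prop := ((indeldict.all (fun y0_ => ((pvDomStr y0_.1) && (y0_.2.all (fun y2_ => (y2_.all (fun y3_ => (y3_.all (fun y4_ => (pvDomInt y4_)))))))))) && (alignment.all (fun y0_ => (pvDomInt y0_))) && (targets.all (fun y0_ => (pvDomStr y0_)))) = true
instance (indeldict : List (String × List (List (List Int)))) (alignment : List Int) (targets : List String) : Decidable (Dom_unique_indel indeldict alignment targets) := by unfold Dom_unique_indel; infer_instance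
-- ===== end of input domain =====

-- B replaces A's per-target rescan over all other taxa by one global counting pass:
-- an indel of a target is unique iff its global count equals the target's own count.

-- ===== PORT A =====
def unique_indel (indeldict : List (String × List (List (List Int)))) (alignment : List Int) (targets : List String) : List (String × List (List (List Int))) :=
  (targets.foldl (fun uniquedict target =>
    -- inner loop over indeldict.items(): gather alldels / allins from taxa ≠ target
    let alls := indeldict.foldl (fun (acc : List (List Int) × List (List Int)) p =>
      if p.1 ≠ target then
        ((acc.1 ++ ((PySem.List.pyGet? p.2 0).getD [])),   -- value[0] raises in Python on an empty value; excluded by Pre_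
         (if 1 < p.2.length then acc.2 ++ ((PySem.List.pyGet? p.2 1).getD []) else acc.2))
      else acc) ([], [])
    -- try: indeldict[target][0] / [1]; any failure → except: pass (both uniq lists stay [])
    let uniq : List (List Int) × List (List Int) :=
      match (PySem.Dict.mk indeldict).get? target with
      | none => ([], [])
      | some v =>
        match PySem.List.pyGet? v 0, PySem.List.pyGet? v 1 with
        | some td, some ti =>
            (td.foldl (fun u c => if c ∈ alls.1 then u else u ++ [c]) [],
             ti.foldl (fun u c => if c ∈ alls.2 then u else u ++ [c]) [])
        | _, _ => ([], [])
    uniquedict.insert target [uniq.1, uniq.2]) PySem.Dict.empty).items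

-- ===== PORT B =====
def unique_indel_alt (indeldict : List (String × List (List (List Int)))) (alignment : List Int) (targets : List String) : List (String × List (List (List Int))) :=
  -- one global pass: Counter of all deletions / insertions across every taxon
  let cnts := indeldict.foldl (fun (acc : PySem.Dict (List Int) Int × PySem.Dict (List Int) Int) p =>
      (if 0 < p.2.length then
         ((PySem.List.pyGet? p.2 0).getD []).foldl (fun d x => d.modify x 0 (· + 1)) acc.1
       else acc.1,
       if 1 < p.2.length then
         ((PySem.List.pyGet? p.2 1).getD []).foldl (fun d x => d.modify x 0 (· + 1)) acc.2
       else acc.2)) (PySem.Dict.empty, PySem.Dict.empty)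
  (targets.foldl (fun out target =>
    let uniq : List (List (List Int)) :=
      match (PySem.Dict.mk indeldict).get? target with
      | some v =>
        if 2 ≤ v.length then
          let dels := (PySem.List.pyGet? v 0).getD []
          let ins := (PySem.List.pyGet? v 1).getD []
          let ownd := PySem.Dict.counter dels
          let owni := PySem.Dict.counter ins
          [dels.filter (fun d => cnts.1.getD d 0 == ownd.getD d 0),
           ins.filter (fun i => cnts.2.getD i 0 == owni.getD i 0)]
        else [[], []]
      | none => [[], []]
    out.insert target uniq) PySem.Dict.empty).items

-- ===== PRECONDITION & SPEC =====
-- Pre_ excludes (a) indeldict with duplicate taxon keys, which no Python dict can represent and on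
-- which the association-list reading is ambiguous, and (b) inputs where some taxon has an empty
-- value list while some target is a different taxon: there Python A raises IndexError on value[0].
def Pre_unique_indel (indeldict : List (String × List (List (List Int)))) (alignment : List Int) (targets : List String) : Prop :=
  (indeldict.map Prod.fst).Nodup ∧ ∀ p ∈ indeldict, ∀ t ∈ targets, p.2 = [] → t = p.1
instance (indeldict : List (String × List (List (List Int)))) (alignment : List Int) (targets : List String) : Decidable (Pre_unique_indel indeldict alignment targets) := by unfold Pre_unique_indel; infer_instance
def pvWitness_unique_indel : (List (String × List (List (List Int)))) × List Int × List String :=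
  ([("a", [[[1,2]],[[3,4]]]), ("b", [[[1,2]],[]])], [], ["a","b"])
def Spec_unique_indel (indeldict : List (String × List (List (List Int)))) (alignment : List Int) (targets : List String) (out : List (String × List (List (List Int)))) : Prop := out = unique_indel_alt indeldict alignment targets
instance (indeldict : List (String × List (List (List Int)))) (alignment : List Int) (targets : List String) (out : List (String × List (List (List Int)))) : Decidable (Spec_unique_indel indeldict alignment targets out) := by unfold Spec_unique_indel; infer_instance

-- ===== CLAIM (what is proved, stated in full; the proofs are below) =====
def Claim_equal_unique_indel : Prop := ∀ (indeldict : List (String × List (List (List Int)))) (alignment : List Int) (targets : List String), Dom_unique_indel indeldict alignment targets → Pre_unique_indel indeldict alignment targets → Spec_unique_indel indeldict alignment targets (unique_indel indeldict alignment targets)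
-- ===== LEMMAS AND PROOFS =====

-- per-entry contributions to the deletion / insertion pools
def pvD0 (v : List (List (List Int))) : List (List Int) := (PySem.List.pyGet? v 0).getD []
def pvD1 (v : List (List (List Int))) : List (List Int) :=
  if 1 < v.length then (PySem.List.pyGet? v 1).getD [] else []

-- A's inner gathering loop produces the concatenations over taxa ≠ target.
theorem A_inner_eq (target : String) (L : List (String × List (List (List Int)))) :
    ∀ a i : List (List Int),
      L.foldl (fun (acc : List (List Int) × List (List Int)) p =>
        if p.1 ≠ target then
          ((acc.1 ++ ((PySem.List.pyGet? p.2 0).getD [])),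
           (if 1 < p.2.length then acc.2 ++ ((PySem.List.pyGet? p.2 1).getD []) else acc.2))
        else acc) (a, i)
      = (a ++ L.flatMap (fun p => if p.1 ≠ target then pvD0 p.2 else []),
         i ++ L.flatMap (fun p => if p.1 ≠ target then pvD1 p.2 else [])) := by
  induction L with
  | nil => simp
  | cons p L ih =>
    intro a i
    rw [List.foldl_cons]
    by_cases h : p.1 = target
    · rw [if_neg (by simp [h]), ih]
      simp [h]
    · rw [if_pos h]
      by_cases h2 : 1 < p.2.length
      · rw [if_pos h2, ih]
        simp [h, h2, pvD0, pvD1, List.append_assoc]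
      · rw [if_neg h2, ih]
        simp [h, h2, pvD0, pvD1, List.append_assoc]

theorem pvD0_of_len_zero (v : List (List (List Int))) (h : ¬ 0 < v.length) : pvD0 v = [] := by
  cases v with
  | nil => rfl
  | cons x xs => simp at h

-- B's global counting loop counts the full concatenations.
theorem B_cnt_eq (L : List (String × List (List (List Int)))) :
    ∀ (d1 d2 : PySem.Dict (List Int) Int) (x : List Int),
      ((L.foldl (fun (acc : PySem.Dict (List Int) Int × PySem.Dict (List Int) Int) p =>
          (if 0 < p.2.length then
             ((PySem.List.pyGet? p.2 0).getD []).foldl (fun d y => d.modify y 0 (· + 1)) acc.1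
           else acc.1,
           if 1 < p.2.length then
             ((PySem.List.pyGet? p.2 1).getD []).foldl (fun d y => d.modify y 0 (· + 1)) acc.2
           else acc.2)) (d1, d2)).1.getD x 0
        = d1.getD x 0 + ((L.flatMap (fun p => pvD0 p.2)).count x : Int))
      ∧ ((L.foldl (fun (acc : PySem.Dict (List Int) Int × PySem.Dict (List Int) Int) p =>
          (if 0 < p.2.length then
             ((PySem.List.pyGet? p.2 0).getD []).foldl (fun d y => d.modify y 0 (· + 1)) acc.1
           else acc.1,
           if 1 < p.2.length then
             ((PySem.List.pyGet? p.2 1).getD []).foldl (fun d y => d.modify y 0 (· + 1)) acc.2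
           else acc.2)) (d1, d2)).2.getD x 0
        = d2.getD x 0 + ((L.flatMap (fun p => pvD1 p.2)).count x : Int)) := by
  induction L with
  | nil => simp
  | cons p L ih =>
    intro d1 d2 x
    rcases ih (if 0 < p.2.length then
             ((PySem.List.pyGet? p.2 0).getD []).foldl (fun d y => d.modify y 0 (· + 1)) d1
           else d1)
        (if 1 < p.2.length then
             ((PySem.List.pyGet? p.2 1).getD []).foldl (fun d y => d.modify y 0 (· + 1)) d2
           else d2) x with ⟨ih1, ih2⟩
    constructor
    · rw [List.foldl_cons, ih1]
      by_cases h : 0 < p.2.length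
      · simp [h, PySem.Dict.getD_foldl_modify_add_one, pvD0, List.count_append]
        push_cast; ring
      · simp [h, pvD0_of_len_zero p.2 h, List.count_append]
    · rw [List.foldl_cons, ih2]
      by_cases h : 1 < p.2.length
      · simp [h, PySem.Dict.getD_foldl_modify_add_one, pvD1, List.count_append]
        push_cast; ring
      · simp [h, pvD1, List.count_append]

-- splitting the global count at the (unique) entry of a key
theorem count_split (f : List (List (List Int)) → List (List Int)) (target : String)
    (L : List (String × List (List (List Int)))) (hnd : (L.map Prod.fst).Nodup) (x : List Int) :
    ((L.flatMap (fun p => f p.2)).count x : Int)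
      = ((L.flatMap (fun p => if p.1 ≠ target then f p.2 else [])).count x : Int)
        + (match (PySem.Dict.mk L).get? target with
           | some v => ((f v).count x : Int)
           | none => 0) := by
  induction L with
  | nil => simp [PySem.Dict.get?]
  | cons p L ih =>
    simp only [List.map_cons, List.nodup_cons] at hnd
    rcases hnd with ⟨hp, hnd⟩
    rw [List.flatMap_cons, List.flatMap_cons, List.count_append, List.count_append]
    by_cases h : p.1 = target
    · have hnone : (PySem.Dict.mk L).get? target = none := by
        rw [PySem.Dict.get?_eq_none_iff_not_mem_keys]
        simpa [PySem.Dict.keys, h] using hp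
      have hcongr : (L.flatMap (fun q => if q.1 ≠ target then f q.2 else []))
          = L.flatMap (fun q => f q.2) := by
        apply List.flatMap_congr
        intro q hq
        have hne : q.1 ≠ target := by
          intro hEq
          apply hp
          have hpq : p.1 = q.1 := by rw [h, hEq]
          rw [hpq]
          exact List.mem_map_of_mem hq
        simp [hne]
      have hget : (PySem.Dict.mk (p :: L)).get? target = some p.2 := by
        rw [PySem.Dict.get?_mk_cons]
        simp [h]
      rw [hget, if_neg (by simp [h]), hcongr]
      simp only [List.count_nil, Nat.cast_zero]
      push_cast
      ring
    · have hget : (PySem.Dict.mk (p :: L)).get? target = (PySem.Dict.mk L).get? target := by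
        rw [PySem.Dict.get?_mk_cons, if_neg (by simpa using h)]
      rw [if_pos h, hget]
      push_cast
      rw [ih hnd]
      ring

theorem filt_eq (S : List (List Int)) (td : List (List Int))
    (inst : (c : List Int) → Decidable (c ∈ S)) : ∀ u : List (List Int),
    td.foldl (fun u c => @ite _ (c ∈ S) (inst c) u (u ++ [c])) u
      = u ++ td.filter (fun c => !(@decide (c ∈ S) (inst c))) := by
  induction td with
  | nil => simp
  | cons c td ih =>
    intro u
    by_cases h : c ∈ S <;> simp [h, ih]

-- per-target values of the two programs (proof-only helpers)
def pvFA (indeldict : List (String × List (List (List Int)))) (target : String) : List (List (List Int)) :=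
  let alls := indeldict.foldl (fun (acc : List (List Int) × List (List Int)) p =>
      if p.1 ≠ target then
        ((acc.1 ++ ((PySem.List.pyGet? p.2 0).getD [])),
         (if 1 < p.2.length then acc.2 ++ ((PySem.List.pyGet? p.2 1).getD []) else acc.2))
      else acc) ([], [])
  let uniq : List (List Int) × List (List Int) :=
    match (PySem.Dict.mk indeldict).get? target with
    | none => ([], [])
    | some v =>
      match PySem.List.pyGet? v 0, PySem.List.pyGet? v 1 with
      | some td, some ti =>
          (td.foldl (fun u c => if c ∈ alls.1 then u else u ++ [c]) [],
           ti.foldl (fun u c => if c ∈ alls.2 then u else u ++ [c]) [])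
      | _, _ => ([], [])
  [uniq.1, uniq.2]

def pvFB (indeldict : List (String × List (List (List Int)))) (target : String) : List (List (List Int)) :=
  let cnts := indeldict.foldl (fun (acc : PySem.Dict (List Int) Int × PySem.Dict (List Int) Int) p =>
      (if 0 < p.2.length then
         ((PySem.List.pyGet? p.2 0).getD []).foldl (fun d x => d.modify x 0 (· + 1)) acc.1
       else acc.1,
       if 1 < p.2.length then
         ((PySem.List.pyGet? p.2 1).getD []).foldl (fun d x => d.modify x 0 (· + 1)) acc.2
       else acc.2)) (PySem.Dict.empty, PySem.Dict.empty)
  match (PySem.Dict.mk indeldict).get? target with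
  | some v =>
    if 2 ≤ v.length then
      let dels := (PySem.List.pyGet? v 0).getD []
      let ins := (PySem.List.pyGet? v 1).getD []
      let ownd := PySem.Dict.counter dels
      let owni := PySem.Dict.counter ins
      [dels.filter (fun d => cnts.1.getD d 0 == ownd.getD d 0),
       ins.filter (fun i => cnts.2.getD i 0 == owni.getD i 0)]
    else [[], []]
  | none => [[], []]

theorem pv_cnt_char (indeldict : List (String × List (List (List Int))))
    (hnd : (indeldict.map Prod.fst).Nodup) (target : String) (v : List (List (List Int)))
    (hget : (PySem.Dict.mk indeldict).get? target = some v)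
    (f : List (List (List Int)) → List (List Int)) (cd : PySem.Dict (List Int) Int)
    (hcd : ∀ x, cd.getD x 0 = ((indeldict.flatMap (fun p => f p.2)).count x : Int)) (c : List Int) :
    cd.getD c 0 = (PySem.Dict.counter (f v)).getD c 0
      ↔ c ∉ indeldict.flatMap (fun p => if p.1 ≠ target then f p.2 else []) := by
  rw [hcd, PySem.Dict.getD_counter, count_split f target indeldict hnd c, hget]
  have hm : (match (some v : Option (List (List (List Int)))) with
      | some v => (((f v).count c : Nat) : Int)
      | none => 0) = (((f v).count c : Nat) : Int) := rfl
  rw [hm]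
  constructor
  · intro hEq hc
    have hpos : 0 < (indeldict.flatMap (fun p => if p.1 ≠ target then f p.2 else [])).count c :=
      List.count_pos_iff.mpr hc
    omega
  · intro hc
    have hzero : (indeldict.flatMap (fun p => if p.1 ≠ target then f p.2 else [])).count c = 0 :=
      List.count_eq_zero.mpr hc
    rw [hzero]
    push_cast
    ring

theorem pv_value_eq (indeldict : List (String × List (List (List Int))))
    (hnd : (indeldict.map Prod.fst).Nodup) (target : String) :
    pvFA indeldict target = pvFB indeldict target := by
  unfold pvFA pvFB
  rw [A_inner_eq target indeldict [] []]
  cases hget : (PySem.Dict.mk indeldict).get? target with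
  | none => simp
  | some v =>
    match v with
    | [] => simp [PySem.List.pyGet?, PySem.List.pyIdx?]
    | [d0] => simp [PySem.List.pyGet?, PySem.List.pyIdx?]
    | d0 :: d1 :: rest =>
      have h0 : PySem.List.pyGet? (d0 :: d1 :: rest) (0 : Int) = some d0 := by
        rw [show (0 : Int) = ((0 : Nat) : Int) by norm_num, PySem.List.pyGet?_natCast]
        rfl
      have h1 : PySem.List.pyGet? (d0 :: d1 :: rest) (1 : Int) = some d1 := by
        rw [show (1 : Int) = ((1 : Nat) : Int) by norm_num, PySem.List.pyGet?_natCast]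
        rfl
      have hlen : 2 ≤ (d0 :: d1 :: rest).length := by simp
      simp only [h0, h1, if_pos hlen, Option.getD_some, List.nil_append]
      refine Eq.trans
        (congrArg₂ (fun a b => [a, b])
          ((filt_eq (List.flatMap (fun p => if p.1 ≠ target then pvD0 p.2 else []) indeldict) d0
              (fun _ => inferInstance) []).trans (List.nil_append _))
          ((filt_eq (List.flatMap (fun p => if p.1 ≠ target then pvD1 p.2 else []) indeldict) d1
              (fun _ => inferInstance) []).trans (List.nil_append _))) ?_
      have hcd0 : ∀ x : List Int,
          ((indeldict.foldl (fun (acc : PySem.Dict (List Int) Int × PySem.Dict (List Int) Int) p =>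
            (if 0 < p.2.length then
               ((PySem.List.pyGet? p.2 0).getD []).foldl (fun d y => d.modify y 0 (· + 1)) acc.1
             else acc.1,
             if 1 < p.2.length then
               ((PySem.List.pyGet? p.2 1).getD []).foldl (fun d y => d.modify y 0 (· + 1)) acc.2
             else acc.2)) (PySem.Dict.empty, PySem.Dict.empty)).1).getD x 0
            = ((indeldict.flatMap (fun p => pvD0 p.2)).count x : Int) := fun x => by
        simpa using (B_cnt_eq indeldict PySem.Dict.empty PySem.Dict.empty x).1
      have hcd1 : ∀ x : List Int,
          ((indeldict.foldl (fun (acc : PySem.Dict (List Int) Int × PySem.Dict (List Int) Int) p =>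
            (if 0 < p.2.length then
               ((PySem.List.pyGet? p.2 0).getD []).foldl (fun d y => d.modify y 0 (· + 1)) acc.1
             else acc.1,
             if 1 < p.2.length then
               ((PySem.List.pyGet? p.2 1).getD []).foldl (fun d y => d.modify y 0 (· + 1)) acc.2
             else acc.2)) (PySem.Dict.empty, PySem.Dict.empty)).2).getD x 0
            = ((indeldict.flatMap (fun p => pvD1 p.2)).count x : Int) := fun x => by
        simpa using (B_cnt_eq indeldict PySem.Dict.empty PySem.Dict.empty x).2
      have hD0v : pvD0 (d0 :: d1 :: rest) = d0 := by
        simp only [pvD0, h0, Option.getD_some]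
      have hD1v : pvD1 (d0 :: d1 :: rest) = d1 := by
        simp only [pvD1, h1, Option.getD_some, if_pos (by simp : 1 < (d0 :: d1 :: rest).length)]
      have hchar0 := pv_cnt_char indeldict hnd target _ hget pvD0 _ hcd0
      have hchar1 := pv_cnt_char indeldict hnd target _ hget pvD1 _ hcd1
      rw [hD0v] at hchar0
      rw [hD1v] at hchar1
      refine List.cons_eq_cons.mpr ⟨?_, List.cons_eq_cons.mpr ⟨?_, rfl⟩⟩
      · apply List.filter_congr
        intro c _
        by_cases hmem : c ∈ List.flatMap (fun p => if p.1 ≠ target then pvD0 p.2 else []) indeldict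
        · have hne := fun hEq => ((hchar0 c).mp hEq) hmem
          rw [PySem.Dict.getD_counter] at hne
          simp [beq_eq_false_iff_ne.mpr hne, PySem.Dict.getD_counter]
          simpa using hmem
        · have hEq := (hchar0 c).mpr hmem
          rw [PySem.Dict.getD_counter] at hEq
          simp [hEq, PySem.Dict.getD_counter]
          simpa using hmem
      · apply List.filter_congr
        intro c _
        by_cases hmem : c ∈ List.flatMap (fun p => if p.1 ≠ target then pvD1 p.2 else []) indeldict
        · have hne := fun hEq => ((hchar1 c).mp hEq) hmem
          rw [PySem.Dict.getD_counter] at hne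
          simp [beq_eq_false_iff_ne.mpr hne, PySem.Dict.getD_counter]
          simpa using hmem
        · have hEq := (hchar1 c).mpr hmem
          rw [PySem.Dict.getD_counter] at hEq
          simp [hEq, PySem.Dict.getD_counter]
          simpa using hmem

-- ===== VERDICT (by name: the statement is the Claim_ definition above) =====
theorem unique_indel_spec : Claim_equal_unique_indel := by
  intro indeldict alignment targets _ hpre
  unfold Spec_unique_indel
  have hA : unique_indel indeldict alignment targets
      = (targets.foldl (fun d t => d.insert t (pvFA indeldict t)) PySem.Dict.empty).items := rfl
  have hB : unique_indel_alt indeldict alignment targets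
      = (targets.foldl (fun d t => d.insert t (pvFB indeldict t)) PySem.Dict.empty).items := rfl
  have hfold : ∀ (ts : List String) (acc : PySem.Dict String (List (List (List Int)))),
      ts.foldl (fun d t => d.insert t (pvFA indeldict t)) acc
        = ts.foldl (fun d t => d.insert t (pvFB indeldict t)) acc := by
    intro ts
    induction ts with
    | nil => intro acc; rfl
    | cons t ts ih =>
      intro acc
      rw [List.foldl_cons, List.foldl_cons, pv_value_eq indeldict hpre.1 t]
      exact ih _
  rw [hA, hB, hfold]
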